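-- pv_equiv track=rewrite | github.com/AdamZhouSE/pythonHomework | Code/CodeRecords/2608/58778/281102.py | makesubstring
-- ===== SOURCE A (Python) =====
-- def makesubstring(st):
--     answer=[st]
--     if(len(st)!=2):
--        temp=[]
--        for i in range(1,len(st)-1):
--            t=st[0:i]+st[i+1:len(st)]
--            answer.append(t)
--            if(len(t)>2):
--                temp.append(t)
--        while len(temp)!=0:
--            t=[]
--            for i in temp:
--                for j in range(1,len(i)-1):
--                    x=i[0:j]+i[j+1:len(i)]
--                    answer.append(x)
--                    if(len(x)>2):
--                        t.append(x)
--            temp=t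
--     return answer
-- ===== SOURCE B (Python) =====
-- def makesubstring(st):
--     # Single-pass BFS: the answer list itself is the FIFO queue, read via cursor i.
--     answer = [st]
--     i = 0
--     while i < len(answer):
--         s = answer[i]
--         for j in range(1, len(s) - 1):
--             answer.append(s[:j] + s[j+1:])
--         i += 1
--     return answer
-- ===== Notes on version B (the rewrite author's own statement) =====
-- stated objective: simpler
-- what changed: Replaced the two-phase level BFS with separate temp/t level buffers and a redundant len(st)!=2 guard by a single loop that uses the answer list itself as a FIFO queue via an index cursor, expanding each entry in place.
import Mathlib
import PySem

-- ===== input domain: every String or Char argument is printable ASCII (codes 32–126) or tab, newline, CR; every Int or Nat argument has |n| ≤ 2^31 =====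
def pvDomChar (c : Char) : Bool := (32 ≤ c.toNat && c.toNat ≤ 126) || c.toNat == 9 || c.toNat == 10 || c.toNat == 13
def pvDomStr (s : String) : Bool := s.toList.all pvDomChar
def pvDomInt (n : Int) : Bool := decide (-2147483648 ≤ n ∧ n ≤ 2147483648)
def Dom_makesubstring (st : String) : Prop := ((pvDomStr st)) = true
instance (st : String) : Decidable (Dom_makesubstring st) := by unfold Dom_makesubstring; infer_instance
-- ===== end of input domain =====

-- B replaces A's two-phase level BFS (separate temp/t buffers, redundant len!=2 guard) with one
-- loop that uses the answer list itself as a FIFO queue via an index cursor: simpler, same output.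

-- ===== PORT A =====
-- shared helpers and the termination lemmas the ports' loops cite by name

-- st[0:i] + st[i+1:len(st)] (A's deletion of the character at index i)
def pvDelA (s : List Char) (i : Int) : List Char :=
  PySem.List.slice s (some 0) (some i) ++ PySem.List.slice s (some (i + 1)) (some (s.length : Int))

-- canonical form of one level of deletions, used by the termination measures and the proofs
def pvKids (s : List Char) : List (List Char) :=
  (List.range (s.length - 2)).map (fun k => s.take (k + 1) ++ s.drop (k + 2))

lemma pvDelA_nat (s : List Char) (k : Nat) :
    pvDelA s (1 + (k : Int)) = s.take (k + 1) ++ s.drop (k + 2) := by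
  unfold pvDelA
  have h1 : (1 : Int) + (k : Int) = ((k + 1 : Nat) : Int) := by push_cast; ring
  have h2 : ((k + 1 : Nat) : Int) + 1 = ((k + 2 : Nat) : Int) := by push_cast; ring
  rw [h1, h2, PySem.List.slice_zero_start, PySem.List.slice_to_natCast, PySem.List.slice_natCast]
  congr 1
  exact List.take_of_length_le (by simp)

lemma pvRange_map_delA (s : List Char) :
    (PySem.List.pyRange 1 ((s.length : Int) - 1) 1).map (pvDelA s) = pvKids s := by
  rw [PySem.List.pyRange_one]
  have hn : ((s.length : Int) - 1 - 1).toNat = s.length - 2 := by omega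
  simp [hn, pvKids, List.map_map, Function.comp, pvDelA_nat]

lemma pvKids_len {s x : List Char} (h : x ∈ pvKids s) : x.length + 1 = s.length := by
  unfold pvKids at h
  simp only [List.mem_map, List.mem_range] at h
  obtain ⟨k, hk, rfl⟩ := h
  simp [List.length_take, List.length_drop]
  omega

lemma pvKids_nil {s : List Char} (h : s.length ≤ 2) : pvKids s = [] := by
  unfold pvKids
  have : s.length - 2 = 0 := by omega
  rw [this]; rfl

-- A's while-loop measure: 1 + the largest string length in the pending level
def pvMu (l : List (List Char)) : Nat := l.foldr (fun s m => max (s.length + 1) m) 0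

lemma le_pvMu {s : List Char} {l : List (List Char)} (h : s ∈ l) : s.length + 1 ≤ pvMu l := by
  induction l with
  | nil => cases h
  | cons x xs ih =>
    rcases List.mem_cons.mp h with rfl | h'
    · simp [pvMu]
    · have := ih h'; simp only [pvMu, List.foldr_cons] at *; omega

lemma pvMu_le {l : List (List Char)} {k : Nat} (h : ∀ s ∈ l, s.length + 1 ≤ k) : pvMu l ≤ k := by
  induction l with
  | nil => simp [pvMu]
  | cons x xs ih =>
    have hx := h x (by simp)
    have := ih (fun s hs => h s (by simp [hs]))
    simp only [pvMu, List.foldr_cons] at *; omega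

lemma pvMu_pos {l : List (List Char)} (h : l ≠ []) : 1 ≤ pvMu l := by
  cases l with
  | nil => exact absurd rfl h
  | cons x xs => have := le_pvMu (l := x :: xs) (s := x) (by simp); omega

-- all deletions of one whole level
def pvCAll (l : List (List Char)) : List (List Char) := l.flatMap pvKids

lemma pvCAll_mu_lt {l : List (List Char)} (h : l ≠ []) : pvMu (pvCAll l) < pvMu l := by
  have hb : pvMu (pvCAll l) ≤ pvMu l - 1 := by
    apply pvMu_le
    intro x hx
    simp only [pvCAll, List.mem_flatMap] at hx
    obtain ⟨s, hs, hxs⟩ := hx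
    have h1 := pvKids_len hxs
    have h2 := le_pvMu hs
    omega
  have := pvMu_pos h
  omega

lemma pvMu_filter_le (l : List (List Char)) (p : List Char → Bool) :
    pvMu (l.filter p) ≤ pvMu l := by
  apply pvMu_le
  intro s hs
  exact le_pvMu (List.mem_of_mem_filter hs)

-- the inner for-loop of A (also A's first phase): append each deletion to answer,
-- and to the next level when its length exceeds 2
def pvStep (s : List Char) (acc : List (List Char) × List (List Char)) :
    List (List Char) × List (List Char) :=
  (PySem.List.pyRange 1 ((s.length : Int) - 1) 1).foldl
    (fun acc2 j =>
      let x := pvDelA s j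
      (acc2.1 ++ [x], if 2 < x.length then acc2.2 ++ [x] else acc2.2)) acc

lemma pvStepAux (s : List Char) (xs : List Int) (acc : List (List Char) × List (List Char)) :
    xs.foldl
      (fun acc2 j =>
        let x := pvDelA s j
        (acc2.1 ++ [x], if 2 < x.length then acc2.2 ++ [x] else acc2.2)) acc
    = (acc.1 ++ xs.map (pvDelA s),
       acc.2 ++ (xs.map (pvDelA s)).filter (fun t => decide (2 < t.length))) := by
  induction xs generalizing acc with
  | nil => simp
  | cons x xs ih =>
    simp only [List.foldl_cons, List.map_cons, List.filter_cons, ih]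
    by_cases hx : 2 < (pvDelA s x).length <;> simp [hx]

lemma pvStep_eq (s : List Char) (acc : List (List Char) × List (List Char)) :
    pvStep s acc = (acc.1 ++ pvKids s, acc.2 ++ (pvKids s).filter (fun t => decide (2 < t.length))) := by
  unfold pvStep
  rw [pvStepAux, pvRange_map_delA]

lemma pvFold_eq (l : List (List Char)) (acc : List (List Char) × List (List Char)) :
    l.foldl (fun acc i => pvStep i acc) acc
      = (acc.1 ++ pvCAll l, acc.2 ++ (pvCAll l).filter (fun t => decide (2 < t.length))) := by
  induction l generalizing acc with
  | nil => simp [pvCAll]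
  | cons x xs ih =>
    rw [List.foldl_cons, ih, pvStep_eq]
    simp [pvCAll, List.filter_append, List.append_assoc]

-- one iteration of A's while-loop body: expand the whole pending level, collect the next one
def pvBody (temp answer : List (List Char)) : List (List Char) × List (List Char) :=
  temp.foldl (fun acc i => pvStep i acc) (answer, ([] : List (List Char)))

lemma pvBody_eq (temp answer : List (List Char)) :
    pvBody temp answer
      = (answer ++ pvCAll temp, (pvCAll temp).filter (fun t => decide (2 < t.length))) := by
  unfold pvBody
  rw [pvFold_eq]
  rfl

-- A's while loop
def pvAWhile (temp answer : List (List Char)) : List (List Char) :=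
  if h : temp = [] then answer
  else
    let r := pvBody temp answer
    pvAWhile r.2 r.1
termination_by pvMu temp
decreasing_by
  rw [pvBody_eq]
  have h1 := pvMu_filter_le (pvCAll temp) (fun t => decide (2 < t.length))
  have h2 := pvCAll_mu_lt h
  simpa using lt_of_le_of_lt h1 h2

def makesubstring (st : String) : List String :=
  let s := st.toList
  if s.length ≠ 2 then
    let r := pvStep s ([s], [])
    (pvAWhile r.2 r.1).map String.ofList
  else [s].map String.ofList

-- ===== PORT B =====
-- s[:j] + s[j+1:] (B's deletion of the character at index j)
def pvDelB (s : List Char) (j : Int) : List Char :=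
  PySem.List.slice s none (some j) ++ PySem.List.slice s (some (j + 1)) none

lemma pvDelB_nat (s : List Char) (k : Nat) :
    pvDelB s (1 + (k : Int)) = s.take (k + 1) ++ s.drop (k + 2) := by
  unfold pvDelB
  have h1 : (1 : Int) + (k : Int) = ((k + 1 : Nat) : Int) := by push_cast; ring
  have h2 : ((k + 1 : Nat) : Int) + 1 = ((k + 2 : Nat) : Int) := by push_cast; ring
  rw [h1, h2, PySem.List.slice_to_natCast, PySem.List.slice_from_natCast]

lemma pvRange_map_delB (s : List Char) :
    (PySem.List.pyRange 1 ((s.length : Int) - 1) 1).map (pvDelB s) = pvKids s := by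
  rw [PySem.List.pyRange_one]
  have hn : ((s.length : Int) - 1 - 1).toNat = s.length - 2 := by omega
  simp [hn, pvKids, List.map_map, Function.comp, pvDelB_nat]

-- B's queue measure: total number of BFS-tree nodes below a string of the given length
def pvW : Nat → Nat
  | 0 => 1
  | 1 => 1
  | 2 => 1
  | n + 3 => 1 + (n + 1) * pvW (n + 2)

lemma pvW_pos (n : Nat) : 1 ≤ pvW n := by
  match n with
  | 0 => simp [pvW]
  | 1 => simp [pvW]
  | 2 => simp [pvW]
  | n + 3 => simp [pvW]

def pvWsum (l : List (List Char)) : Nat := (l.map (fun s => pvW s.length)).sum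

lemma pvWsum_kids (s : List Char) : pvWsum (pvKids s) < pvW s.length := by
  by_cases h2 : s.length ≤ 2
  · rw [pvKids_nil h2]
    have := pvW_pos s.length
    simpa [pvWsum] using this
  · have hrep : (pvKids s).map (fun x => pvW x.length)
        = List.replicate (s.length - 2) (pvW (s.length - 1)) := by
      rw [List.eq_replicate_iff]
      constructor
      · simp [pvKids]
      · intro b hb
        simp only [List.mem_map] at hb
        obtain ⟨x, hx, rfl⟩ := hb
        have := pvKids_len hx
        congr 1
        omega
    obtain ⟨n, hn⟩ : ∃ n, s.length = n + 3 := ⟨s.length - 3, by omega⟩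
    have hW : pvW (n + 3) = 1 + (n + 1) * pvW (n + 2) := rfl
    rw [pvWsum, hrep, List.sum_replicate, smul_eq_mul, hn]
    have : n + 3 - 2 = n + 1 := by omega
    rw [this, hW]
    have : n + 3 - 1 = n + 2 := by omega
    rw [this]
    omega

-- B's loop: the answer list is the queue, read at cursor i
def pvBLoop (answer : List (List Char)) (i : Nat) : List (List Char) :=
  if h : i < answer.length then
    pvBLoop
      ((PySem.List.pyRange 1 ((answer[i].length : Int) - 1) 1).foldl
        (fun a j => a ++ [pvDelB answer[i] j]) answer)
      (i + 1)
  else answer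
termination_by pvWsum (answer.drop i)
decreasing_by
  rw [PySem.List.foldl_append_singleton_eq_map, pvRange_map_delB]
  have hdrop : (answer ++ pvKids answer[i]).drop (i + 1)
      = answer.drop (i + 1) ++ pvKids answer[i] :=
    List.drop_append_of_le_length (by omega)
  have h1 := pvWsum_kids answer[i]
  have h2 : answer.drop i = answer[i] :: answer.drop (i + 1) := List.drop_eq_getElem_cons h
  rw [hdrop, h2]
  simp only [pvWsum, List.map_append, List.sum_append, List.map_cons, List.sum_cons] at h1 ⊢
  omega

def makesubstring_alt (st : String) : List String :=
  (pvBLoop [st.toList] 0).map String.ofList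

-- ===== PRECONDITION & SPEC =====
def Spec_makesubstring (st : String) (out : List String) : Prop := out = makesubstring_alt st
instance (st : String) (out : List String) : Decidable (Spec_makesubstring st out) := by unfold Spec_makesubstring; infer_instance

-- ===== CLAIM (what is proved, stated in full; the proofs are below) =====
def Claim_equal_makesubstring : Prop := ∀ (st : String), Dom_makesubstring st → Spec_makesubstring st (makesubstring st)

-- ===== LEMMAS AND PROOFS =====

-- the full BFS output below one pending level, level by level
def pvTail (l : List (List Char)) : List (List Char) :=
  if h : l = [] then [] else pvCAll l ++ pvTail (pvCAll l)
termination_by pvMu l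
decreasing_by exact pvCAll_mu_lt h

lemma pvCAll_nil : pvCAll [] = [] := rfl

lemma pvCAll_singleton (s : List Char) : pvCAll [s] = pvKids s := by simp [pvCAll]

lemma pvCAll_append (a b : List (List Char)) : pvCAll (a ++ b) = pvCAll a ++ pvCAll b := by
  simp [pvCAll]

lemma pvCAll_cons (y : List Char) (ys : List (List Char)) :
    pvCAll (y :: ys) = pvKids y ++ pvCAll ys := rfl

lemma pvTail_nil : pvTail [] = [] := by
  rw [pvTail.eq_def]
  rfl

lemma pvTail_eq (l : List (List Char)) : pvTail l = pvCAll l ++ pvTail (pvCAll l) := by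
  by_cases h : l = []
  · subst h; rw [pvTail_nil, pvCAll_nil, pvTail_nil]; rfl
  · rw [pvTail.eq_def]; simp [h]

-- queue order equals level order: expanding a prefix a first just moves its children after b
lemma pvL : ∀ (n : Nat) (a b : List (List Char)), pvMu (a ++ b) ≤ n →
    pvTail (a ++ b) = pvCAll a ++ pvTail (b ++ pvCAll a) := by
  intro n
  induction n with
  | zero =>
    intro a b h
    have hab : a ++ b = [] := by
      by_contra hne
      have := pvMu_pos hne
      omega
    obtain ⟨ha, hb⟩ := List.append_eq_nil_iff.mp hab
    subst ha; subst hb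
    simp [pvTail_nil, pvCAll_nil]
  | succ n ih =>
    intro a b h
    by_cases hab : a ++ b = []
    · obtain ⟨ha, hb⟩ := List.append_eq_nil_iff.mp hab
      subst ha; subst hb
      simp [pvTail_nil, pvCAll_nil]
    · rw [pvTail_eq (a ++ b), pvCAll_append]
      rw [ih (pvCAll a) (pvCAll b)
        (by rw [← pvCAll_append]; have := pvCAll_mu_lt hab; omega)]
      rw [pvTail_eq (b ++ pvCAll a), pvCAll_append]
      simp [List.append_assoc]

lemma pvTail_cons (s : List Char) (rest : List (List Char)) :
    pvTail (s :: rest) = pvKids s ++ pvTail (rest ++ pvKids s) := by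
  have := pvL (pvMu ([s] ++ rest)) [s] rest le_rfl
  simpa [pvCAll_singleton] using this

-- the filter to the next level drops only strings of length ≤ 2, which have no children
lemma pvBigKids (l : List (List Char)) :
    pvCAll (l.filter (fun t => decide (2 < t.length))) = pvCAll l := by
  induction l with
  | nil => rfl
  | cons x xs ih =>
    rw [List.filter_cons]
    by_cases hx : 2 < x.length
    · simp only [hx, decide_true, if_true]
      rw [pvCAll_cons, pvCAll_cons, ih]
    · simp only [hx, decide_false, Bool.false_eq_true, if_false]
      rw [pvCAll_cons, pvKids_nil (by omega), ih]
      simp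

lemma pvTail_filter (l : List (List Char)) :
    pvTail (l.filter (fun t => decide (2 < t.length))) = pvTail l := by
  rw [pvTail_eq, pvTail_eq l, pvBigKids]

lemma pvAWhile_eq : ∀ (n : Nat) (temp answer : List (List Char)), pvMu temp ≤ n →
    pvAWhile temp answer = answer ++ pvTail temp := by
  intro n
  induction n with
  | zero =>
    intro temp answer h
    have htemp : temp = [] := by
      by_contra hne
      have := pvMu_pos hne
      omega
    subst htemp
    rw [pvAWhile.eq_def]
    simp [pvTail_nil]
  | succ n ih =>
    intro temp answer h
    by_cases htemp : temp = []
    · subst htemp; rw [pvAWhile.eq_def]; simp [pvTail_nil]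
    · rw [pvAWhile.eq_def]
      simp only [htemp, dif_neg, not_false_iff]
      rw [pvBody_eq]
      dsimp only
      have hlt := pvCAll_mu_lt htemp
      have hle := pvMu_filter_le (pvCAll temp) (fun t => decide (2 < t.length))
      rw [ih _ _ (by omega)]
      rw [pvTail_filter, List.append_assoc, ← pvTail_eq]

lemma pvBLoop_eq : ∀ (n : Nat) (answer : List (List Char)) (i : Nat),
    pvWsum (answer.drop i) ≤ n → pvBLoop answer i = answer ++ pvTail (answer.drop i) := by
  intro n
  induction n with
  | zero =>
    intro answer i h
    by_cases hi : i < answer.length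
    · exfalso
      have h2 : answer.drop i = answer[i] :: answer.drop (i + 1) := List.drop_eq_getElem_cons hi
      have := pvW_pos answer[i].length
      rw [h2] at h
      simp only [pvWsum, List.map_cons, List.sum_cons] at h
      omega
    · rw [pvBLoop.eq_def]
      simp only [hi, dif_neg, not_false_iff]
      rw [List.drop_of_length_le (by omega), pvTail_nil, List.append_nil]
  | succ n ih =>
    intro answer i h
    by_cases hi : i < answer.length
    · rw [pvBLoop.eq_def]
      simp only [hi, dif_pos]
      rw [PySem.List.foldl_append_singleton_eq_map, pvRange_map_delB]
      have hdrop : (answer ++ pvKids answer[i]).drop (i + 1)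
          = answer.drop (i + 1) ++ pvKids answer[i] :=
        List.drop_append_of_le_length (by omega)
      have hcons : answer.drop i = answer[i] :: answer.drop (i + 1) := List.drop_eq_getElem_cons hi
      have hkids := pvWsum_kids answer[i]
      have hmeas : pvWsum ((answer ++ pvKids answer[i]).drop (i + 1)) ≤ n := by
        rw [hdrop]
        rw [hcons] at h
        simp only [pvWsum, List.map_append, List.sum_append, List.map_cons, List.sum_cons] at hkids h ⊢
        omega
      rw [ih _ _ hmeas, hdrop, hcons, pvTail_cons]
      simp [List.append_assoc]
    · rw [pvBLoop.eq_def]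
      simp only [hi, dif_neg, not_false_iff]
      rw [List.drop_of_length_le (by omega), pvTail_nil, List.append_nil]

-- ===== VERDICT (by name: the statement is the Claim_ definition above) =====
theorem makesubstring_spec : Claim_equal_makesubstring := by
  intro st _hd
  unfold Spec_makesubstring
  have hB : makesubstring_alt st = ([st.toList] ++ pvTail [st.toList]).map String.ofList := by
    unfold makesubstring_alt
    rw [pvBLoop_eq (pvWsum ([st.toList].drop 0)) [st.toList] 0 le_rfl]
    simp
  have hT : pvTail [st.toList] = pvKids st.toList ++ pvTail (pvKids st.toList) := by
    rw [pvTail_eq, pvCAll_singleton]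
  unfold makesubstring
  by_cases h2 : st.toList.length ≠ 2
  · rw [if_pos h2]
    rw [pvStep_eq]
    simp only [List.nil_append]
    rw [pvAWhile_eq (pvMu ((pvKids st.toList).filter (fun t => decide (2 < t.length)))) _ _ le_rfl]
    rw [pvTail_filter, hB, hT]
    simp
  · rw [if_neg h2]
    have hk : pvKids st.toList = [] := pvKids_nil (by omega)
    rw [hB, hT, hk, pvTail_nil]
    simp
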